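-- pv_equiv track=rewrite | github.com/Anac0n6a/homework | zero_house.py | house_calc
-- ===== SOURCE A (Python) =====
-- def house_calc(street_distance: int, street: int):
--     distance = []
--     zero = None
--     for iteration, element in enumerate(street):
--         if element == 0:
--             zero = iteration
--             distance.append(0)
--             continue
--         if (element != 0 and zero != None):
--             distance.append(iteration - zero)
--         else:
--             distance.append(street_distance)
--     zero = None
--     for iteration, element in reversed(list(enumerate(street))):
--         if element == 0:
--             zero = iteration
--             continue
--         if (element != 0 and zero != None and distance[iteration] > zero - iteration):
--             distance[iteration] = (zero - iteration)
--     return distance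
-- ===== SOURCE B (Python) =====
-- def house_calc(street_distance: int, street: int):
--     zeros = [i for i, e in enumerate(street) if e == 0]
--     result = []
--     j = 0
--     for i, e in enumerate(street):
--         if e == 0:
--             result.append(0)
--             continue
--         while j < len(zeros) and zeros[j] < i:
--             j += 1
--         left = i - zeros[j - 1] if j > 0 else street_distance
--         if j < len(zeros):
--             result.append(min(left, zeros[j] - i))
--         else:
--             result.append(left)
--     return result
-- ===== Notes on version B (the rewrite author's own statement) =====
-- stated objective: alternative
-- what changed: A fills the list with left-zero distances and then patches it in a second, reversed pass; B collects the zero indices once and, in a single forward pass with a marching pointer into that list, emits min(left distance or street_distance, right distance) directly.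
import Mathlib
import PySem

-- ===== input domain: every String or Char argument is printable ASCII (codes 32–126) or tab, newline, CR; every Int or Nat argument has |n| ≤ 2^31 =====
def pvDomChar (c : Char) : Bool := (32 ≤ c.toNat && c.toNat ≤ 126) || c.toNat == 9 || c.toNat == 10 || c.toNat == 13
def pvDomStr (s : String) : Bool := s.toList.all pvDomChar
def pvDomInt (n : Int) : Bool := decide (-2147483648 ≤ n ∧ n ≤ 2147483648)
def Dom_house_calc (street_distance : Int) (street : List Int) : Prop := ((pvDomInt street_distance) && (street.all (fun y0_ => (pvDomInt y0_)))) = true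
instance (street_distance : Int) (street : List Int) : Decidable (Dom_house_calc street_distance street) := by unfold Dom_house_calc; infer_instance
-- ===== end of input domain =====

-- B builds the list of zero indices once and, in a single forward pass with a marching
-- pointer into it, emits min(left-distance or street_distance, right-distance) directly,
-- instead of A's append-then-patch two-pass scheme (objective: alternative).

-- ===== PORT A =====
-- forward loop of A: walks street with the running index, appending to `distance`
def pvFwdA (street_distance : Int) : List Int → Nat → List Int → Option Nat → List Int × Option Nat
  | [], _, distance, zero => (distance, zero)
  | element :: rest, iteration, distance, zero =>
    if element = 0 then
      pvFwdA street_distance rest (iteration + 1) (distance ++ [0]) (some iteration)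
    else
      match zero with
      | some z => pvFwdA street_distance rest (iteration + 1) (distance ++ [(iteration : Int) - (z : Int)]) zero
      | none => pvFwdA street_distance rest (iteration + 1) (distance ++ [street_distance]) zero

-- list(enumerate(street))
def pvEnumA : List Int → Nat → List (Nat × Int)
  | [], _ => []
  | x :: xs, i => (i, x) :: pvEnumA xs (i + 1)

-- backward loop of A over reversed(list(enumerate(street))); indices are in range so
-- `distance[iteration]` reads/writes are List.getD/List.set
def pvBwdA : List (Nat × Int) → List Int → Option Nat → List Int
  | [], distance, _ => distance
  | (iteration, element) :: rest, distance, zero =>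
    if element = 0 then pvBwdA rest distance (some iteration)
    else
      match zero with
      | some z =>
        if distance.getD iteration 0 > (z : Int) - (iteration : Int) then
          pvBwdA rest (distance.set iteration ((z : Int) - (iteration : Int))) zero
        else pvBwdA rest distance zero
      | none => pvBwdA rest distance zero

def house_calc (street_distance : Int) (street : List Int) : List Int :=
  pvBwdA (pvEnumA street 0).reverse (pvFwdA street_distance street 0 [] none).1 none

-- ===== PORT B =====
-- zeros = [i for i, e in enumerate(street) if e == 0]
def pvZerosB : List Int → Nat → List Nat
  | [], _ => []
  | e :: rest, i => if e = 0 then i :: pvZerosB rest (i + 1) else pvZerosB rest (i + 1)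

-- while j < len(zeros) and zeros[j] < i: j += 1
def pvAdvance (zeros : List Nat) (j : Nat) (i : Nat) : Nat :=
  if h : j < zeros.length then
    if zeros[j] < i then pvAdvance zeros (j + 1) i else j
  else j
termination_by zeros.length - j

-- main loop of B: one pass, marching pointer j into zeros
def pvLoopB (street_distance : Int) (zeros : List Nat) : List Int → Nat → Nat → List Int → List Int
  | [], _, _, result => result
  | e :: rest, i, j, result =>
    if e = 0 then pvLoopB street_distance zeros rest (i + 1) j (result ++ [0])
    else
      let j' := pvAdvance zeros j i
      let left := if 0 < j' then (i : Int) - (zeros.getD (j' - 1) 0 : Nat) else street_distance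
      match zeros[j']? with
      | some rz => pvLoopB street_distance zeros rest (i + 1) j' (result ++ [min left ((rz : Int) - (i : Int))])
      | none => pvLoopB street_distance zeros rest (i + 1) j' (result ++ [left])

def house_calc_alt (street_distance : Int) (street : List Int) : List Int :=
  pvLoopB street_distance (pvZerosB street 0) street 0 0 []

-- ===== PRECONDITION & SPEC =====
def Spec_house_calc (street_distance : Int) (street : List Int) (out : List Int) : Prop := out = house_calc_alt street_distance street
instance (street_distance : Int) (street : List Int) (out : List Int) : Decidable (Spec_house_calc street_distance street out) := by unfold Spec_house_calc; infer_instance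

-- ===== CLAIM (what is proved, stated in full; the proofs are below) =====
def Claim_equal_house_calc : Prop := ∀ (street_distance : Int) (street : List Int), Dom_house_calc street_distance street → Spec_house_calc street_distance street (house_calc street_distance street)

-- ===== LEMMAS AND PROOFS =====

-- `street[k] == 0` (as seen through getD; only used at k < length)
def pvZ (s : List Int) (k : Nat) : Bool := s.getD k 1 == 0
-- index of the nearest zero strictly left of i
def pvLz (s : List Int) (i : Nat) : Option Nat := ((List.range i).filter (pvZ s)).getLast?
-- index of the nearest zero strictly right of i
def pvNz (s : List Int) (i : Nat) : Option Nat := ((List.range s.length).filter (fun k => decide (i < k) && pvZ s k)).head?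
-- the value A's forward pass leaves at position i
def pvFwdVal (sd : Int) (s : List Int) (i : Nat) : Int :=
  if pvZ s i then 0 else match pvLz s i with | some m => (i : Int) - m | none => sd
-- the common final value at position i
def pvVal (sd : Int) (s : List Int) (i : Nat) : Int :=
  if pvZ s i then 0 else
    match pvNz s i with
    | some k => min (match pvLz s i with | some m => (i : Int) - m | none => sd) ((k : Int) - i)
    | none => match pvLz s i with | some m => (i : Int) - m | none => sd
-- [f i, f (i+1), …, f (i+c-1)]
def pvVals (f : Nat → Int) (i : Nat) : Nat → List Int
  | 0 => []
  | c + 1 => f i :: pvVals f (i + 1) c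

theorem pvVals_length (f : Nat → Int) (i c : Nat) : (pvVals f i c).length = c := by
  induction c generalizing i with
  | zero => rfl
  | succ c ih => simp [pvVals, ih]

theorem pvVals_getD (f : Nat → Int) (i c t : Nat) (h : t < c) :
    (pvVals f i c).getD t 0 = f (i + t) := by
  induction c generalizing i t with
  | zero => omega
  | succ c ih =>
    cases t with
    | zero => simp [pvVals]
    | succ t =>
      have := ih (i + 1) t (by omega)
      simpa [pvVals, Nat.add_assoc, Nat.add_comm 1 t] using this

theorem pvZ_append (p l : List Int) (k : Nat) (h : k < p.length) : pvZ (p ++ l) k = pvZ p k := by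
  simp [pvZ, List.getD_eq_getElem?_getD, List.getElem?_append_left h]

theorem pvZ_concat (p : List Int) (x : Int) (l : List Int) : pvZ (p ++ x :: l) p.length = (x == 0) := by
  simp [pvZ, List.getD_eq_getElem?_getD]

theorem pvLz_succ (s : List Int) (i : Nat) :
    pvLz s (i + 1) = if pvZ s i then some i else pvLz s i := by
  unfold pvLz
  rw [List.range_succ, List.filter_append]
  by_cases h : pvZ s i <;> simp [h, List.getLast?_append]

theorem pvLz_prefix (p u : List Int) (i : Nat) (h : i ≤ p.length) :
    pvLz (p ++ u) i = pvLz p i := by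
  unfold pvLz
  congr 1
  apply List.filter_congr
  intro k hk
  exact pvZ_append p u k (by simp at hk; omega)

theorem pvFwdA_spec (sd : Int) (l p d : List Int) :
    pvFwdA sd l p.length d (pvLz p p.length)
      = (d ++ pvVals (pvFwdVal sd (p ++ l)) p.length l.length, pvLz (p ++ l) (p.length + l.length)) := by
  induction l generalizing p d with
  | nil => simp [pvFwdA, pvVals]
  | cons x rest ih =>
    have hz : pvZ (p ++ x :: rest) p.length = (x == 0) := pvZ_concat p x rest
    have hs : (p ++ [x]) ++ rest = p ++ x :: rest := by simp
    have hcnt : p.length + (rest.length + 1) = (p.length + 1) + rest.length := by omega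
    have hlz1 : pvLz (p ++ [x]) (p.length + 1) = if x = 0 then some p.length else pvLz p p.length := by
      rw [pvLz_succ]
      have h0 : pvZ (p ++ [x]) p.length = (x == 0) := pvZ_concat p x []
      rw [h0, pvLz_prefix p [x] p.length (le_refl _)]
      by_cases hx : x = 0 <;> simp [hx]
    have hlen : (p ++ [x]).length = p.length + 1 := by simp
    by_cases hx : x = 0
    · have h1 := ih (p ++ [x]) (d ++ [0])
      rw [hlen, hs, hlz1, if_pos hx] at h1
      have hv : pvFwdVal sd (p ++ x :: rest) p.length = 0 := by
        unfold pvFwdVal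
        rw [hz]
        simp [hx]
      simp only [pvFwdA]
      rw [if_pos hx, List.length_cons]
      simp only [pvVals]
      rw [hv, hcnt]
      rw [← List.append_cons] at h1
      exact h1
    · have hvz : pvZ (p ++ x :: rest) p.length = false := by simp [hz, hx]
      have hpre : pvLz (p ++ x :: rest) p.length = pvLz p p.length :=
        pvLz_prefix p (x :: rest) p.length (le_refl _)
      cases hlzp : pvLz p p.length with
      | some z =>
        have h1 := ih (p ++ [x]) (d ++ [(p.length : Int) - z])
        rw [hlen, hs, hlz1, if_neg hx, hlzp] at h1
        have hv : pvFwdVal sd (p ++ x :: rest) p.length = (p.length : Int) - z := by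
          simp [pvFwdVal, hvz, hpre, hlzp]
        simp only [pvFwdA]
        rw [if_neg hx, List.length_cons]
        simp only [pvVals]
        rw [hv, hcnt]
        rw [← List.append_cons] at h1
        exact h1
      | none =>
        have h1 := ih (p ++ [x]) (d ++ [sd])
        rw [hlen, hs, hlz1, if_neg hx, hlzp] at h1
        have hv : pvFwdVal sd (p ++ x :: rest) p.length = sd := by
          simp [pvFwdVal, hvz, hpre, hlzp]
        simp only [pvFwdA]
        rw [if_neg hx, List.length_cons]
        simp only [pvVals]
        rw [hv, hcnt]
        rw [← List.append_cons] at h1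
        exact h1

theorem pvBwdA_length (ps : List (Nat × Int)) (d : List Int) (z : Option Nat) :
    (pvBwdA ps d z).length = d.length := by
  induction ps generalizing d z with
  | nil => rfl
  | cons q rest ih =>
    obtain ⟨i, e⟩ := q
    by_cases he : e = 0 <;> simp only [pvBwdA, he, if_pos, if_neg, reduceIte]
    · exact ih d (some i)
    · cases z with
      | none => exact ih d none
      | some zz =>
        simp only [pvBwdA]
        split <;> simp [ih]

theorem pvEnumA_append (a b : List Int) (i : Nat) :
    pvEnumA (a ++ b) i = pvEnumA a i ++ pvEnumA b (i + a.length) := by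
  induction a generalizing i with
  | nil => simp [pvEnumA]
  | cons x xs ih => simp [pvEnumA, ih, Nat.add_assoc, Nat.add_comm 1 xs.length]

theorem pvNz_concat (q : List Int) (x : Int) (i : Nat) :
    pvNz (q ++ [x]) i = (pvNz q i).or (if x = 0 ∧ i < q.length then some q.length else none) := by
  unfold pvNz
  have hlen : (q ++ [x]).length = q.length + 1 := by simp
  rw [hlen, List.range_succ, List.filter_append]
  have h1 : (List.range q.length).filter (fun k => decide (i < k) && pvZ (q ++ [x]) k)
      = (List.range q.length).filter (fun k => decide (i < k) && pvZ q k) := by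
    apply List.filter_congr
    intro k hk
    simp only [List.mem_range] at hk
    rw [pvZ_append q [x] k hk]
  rw [h1, List.head?_append]
  congr 1
  have h2 : pvZ (q ++ [x]) q.length = (x == 0) := pvZ_concat q x []
  have h3 : (decide (i < q.length) && pvZ (q ++ [x]) q.length) = decide (x = 0 ∧ i < q.length) := by
    rw [h2]
    by_cases hx : x = 0 <;> by_cases hi : i < q.length <;> simp [hx, hi]
  rw [List.filter_singleton, h3]
  by_cases h : x = 0 ∧ i < q.length <;> simp [h]

theorem pvNz_none (q : List Int) (i : Nat) (h : q.length ≤ i) : pvNz q i = none := by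
  unfold pvNz
  have : (List.range q.length).filter (fun k => decide (i < k) && pvZ q k) = [] := by
    apply List.filter_eq_nil_iff.mpr
    intro k hk
    simp only [List.mem_range] at hk
    simp only [Bool.and_eq_true, decide_eq_true_eq, not_and]
    intro hik
    omega
  rw [this]
  rfl

theorem pvGetD_set_self (d : List Int) (m : Nat) (v : Int) (h : m < d.length) :
    (d.set m v).getD m 0 = v := by
  simp [List.getD_eq_getElem?_getD, List.getElem?_set_self, h]

theorem pvGetD_set_ne (d : List Int) (m i : Nat) (v : Int) (h : i ≠ m) :
    (d.set m v).getD i 0 = d.getD i 0 := by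
  simp [List.getD_eq_getElem?_getD, List.getElem?_set_ne (by omega : m ≠ i)]

theorem pvBwdA_cons_zero (m : Nat) (rest : List (Nat × Int)) (d : List Int) (z0 : Option Nat) (x : Int) (hx : x = 0) :
    pvBwdA ((m, x) :: rest) d z0 = pvBwdA rest d (some m) := by
  simp [pvBwdA, hx]

theorem pvBwdA_cons_none (m : Nat) (rest : List (Nat × Int)) (d : List Int) (x : Int) (hx : x ≠ 0) :
    pvBwdA ((m, x) :: rest) d none = pvBwdA rest d none := by
  simp [pvBwdA, hx]

theorem pvBwdA_cons_some (m : Nat) (rest : List (Nat × Int)) (d : List Int) (z : Nat) (x : Int) (hx : x ≠ 0) :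
    pvBwdA ((m, x) :: rest) d (some z) =
      if d.getD m 0 > (z : Int) - (m : Int) then pvBwdA rest (d.set m ((z : Int) - (m : Int))) (some z)
      else pvBwdA rest d (some z) := by
  simp [pvBwdA, hx]

theorem pvBwdA_getD (p d : List Int) (z0 : Option Nat) (hd : p.length ≤ d.length) (i : Nat) :
    (pvBwdA (pvEnumA p 0).reverse d z0).getD i 0 =
      if i < p.length ∧ ¬ (pvZ p i = true) then
        match (pvNz p i).or z0 with
        | some z => if d.getD i 0 > (z : Int) - i then (z : Int) - i else d.getD i 0
        | none => d.getD i 0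
      else d.getD i 0 := by
  induction p using List.reverseRecOn generalizing d z0 i with
  | nil => simp [pvEnumA, pvBwdA]
  | append_singleton q x ih =>
    have hlen : (q ++ [x]).length = q.length + 1 := by simp
    rw [hlen] at hd ⊢
    have hrev : (pvEnumA (q ++ [x]) 0).reverse = (q.length, x) :: (pvEnumA q 0).reverse := by
      rw [pvEnumA_append]
      simp [pvEnumA]
    rw [hrev]
    have hzm : pvZ (q ++ [x]) q.length = (x == 0) := pvZ_concat q x []
    by_cases hx : x = 0
    · rw [pvBwdA_cons_zero q.length (pvEnumA q 0).reverse d z0 x hx]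
      rw [ih d (some q.length) (by omega) i]
      rcases Nat.lt_trichotomy i q.length with hi | hi | hi
      · have hZeq : pvZ (q ++ [x]) i = pvZ q i := pvZ_append q [x] i hi
        rw [pvNz_concat, hZeq, if_pos ((⟨hx, hi⟩ : x = 0 ∧ i < q.length)), Option.or_assoc, Option.some_or]
        have hii : i < q.length + 1 := by omega
        simp only [hi, hii, true_and]
      · have h1 : ¬ (i < q.length ∧ ¬ (pvZ q i = true)) := by omega
        have h2 : ¬ (i < q.length + 1 ∧ ¬ (pvZ (q ++ [x]) i = true)) := by
          rw [hi, hzm]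
          simp [hx]
        rw [if_neg h1, if_neg h2]
      · have h1 : ¬ (i < q.length ∧ ¬ (pvZ q i = true)) := by omega
        have h2 : ¬ (i < q.length + 1 ∧ ¬ (pvZ (q ++ [x]) i = true)) := by omega
        rw [if_neg h1, if_neg h2]
    · have hNx : ∀ j : Nat, pvNz (q ++ [x]) j = pvNz q j := by
        intro j
        rw [pvNz_concat]
        simp [hx]
      cases z0 with
      | none =>
        rw [pvBwdA_cons_none q.length (pvEnumA q 0).reverse d x hx]
        rw [ih d none (by omega) i]
        rcases Nat.lt_trichotomy i q.length with hi | hi | hi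
        · have hZeq : pvZ (q ++ [x]) i = pvZ q i := pvZ_append q [x] i hi
          rw [hNx, hZeq]
          have hii : i < q.length + 1 := by omega
          simp only [hi, hii, true_and]
        · have h1 : ¬ (i < q.length ∧ ¬ (pvZ q i = true)) := by omega
          rw [if_neg h1, hNx, hi, pvNz_none q q.length (le_refl _)]
          by_cases h2 : q.length < q.length + 1 ∧ ¬ (pvZ (q ++ [x]) q.length = true)
          · rw [if_pos h2]
            rfl
          · rw [if_neg h2]
        · have h1 : ¬ (i < q.length ∧ ¬ (pvZ q i = true)) := by omega
          have h2 : ¬ (i < q.length + 1 ∧ ¬ (pvZ (q ++ [x]) i = true)) := by omega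
          rw [if_neg h1, if_neg h2]
      | some z =>
        rw [pvBwdA_cons_some q.length (pvEnumA q 0).reverse d z x hx]
        have hm : q.length < d.length := by omega
        by_cases hgt : d.getD q.length 0 > (z : Int) - (q.length : Int)
        · rw [if_pos hgt]
          rw [ih (d.set q.length ((z : Int) - (q.length : Int))) (some z) (by simp; omega) i]
          rcases Nat.lt_trichotomy i q.length with hi | hi | hi
          · have hZeq : pvZ (q ++ [x]) i = pvZ q i := pvZ_append q [x] i hi
            rw [hNx, hZeq]
            have hii : i < q.length + 1 := by omega
            have hset : (d.set q.length ((z : Int) - (q.length : Int))).getD i 0 = d.getD i 0 :=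
              pvGetD_set_ne d q.length i _ (by omega)
            simp only [hi, hii, true_and, hset]
          · have h1 : ¬ (i < q.length ∧ ¬ (pvZ q i = true)) := by omega
            rw [if_neg h1, hi]
            have h2 : q.length < q.length + 1 ∧ ¬ (pvZ (q ++ [x]) q.length = true) := by
              refine ⟨by omega, ?_⟩
              rw [hzm]
              simp [hx]
            rw [if_pos h2, hNx, pvNz_none q q.length (le_refl _)]
            rw [pvGetD_set_self d q.length _ hm]
            simp only [Option.none_or]
            rw [if_pos hgt]
          · have h1 : ¬ (i < q.length ∧ ¬ (pvZ q i = true)) := by omega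
            have h2 : ¬ (i < q.length + 1 ∧ ¬ (pvZ (q ++ [x]) i = true)) := by omega
            rw [if_neg h1, if_neg h2]
            exact pvGetD_set_ne d q.length i _ (by omega)
        · rw [if_neg hgt]
          rw [ih d (some z) (by omega) i]
          rcases Nat.lt_trichotomy i q.length with hi | hi | hi
          · have hZeq : pvZ (q ++ [x]) i = pvZ q i := pvZ_append q [x] i hi
            rw [hNx, hZeq]
            have hii : i < q.length + 1 := by omega
            simp only [hi, hii, true_and]
          · have h1 : ¬ (i < q.length ∧ ¬ (pvZ q i = true)) := by omega
            rw [if_neg h1, hi]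
            have h2 : q.length < q.length + 1 ∧ ¬ (pvZ (q ++ [x]) q.length = true) := by
              refine ⟨by omega, ?_⟩
              rw [hzm]
              simp [hx]
            rw [if_pos h2, hNx, pvNz_none q q.length (le_refl _)]
            simp only [Option.none_or]
            rw [if_neg hgt]
          · have h1 : ¬ (i < q.length ∧ ¬ (pvZ q i = true)) := by omega
            have h2 : ¬ (i < q.length + 1 ∧ ¬ (pvZ (q ++ [x]) i = true)) := by omega
            rw [if_neg h1, if_neg h2]

-- ---------- B side ----------

-- the zero indices of s, in increasing order
def pvZF (s : List Int) : List Nat := (List.range s.length).filter (pvZ s)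

theorem pvZerosB_go (l p : List Int) :
    pvZerosB l p.length = (List.range' p.length l.length).filter (pvZ (p ++ l)) := by
  induction l generalizing p with
  | nil => simp [pvZerosB]
  | cons x rest ih =>
    have hs : (p ++ [x]) ++ rest = p ++ x :: rest := by simp
    have hz : pvZ (p ++ x :: rest) p.length = (x == 0) := pvZ_concat p x rest
    have h1 := ih (p ++ [x])
    rw [(by simp : (p ++ [x]).length = p.length + 1), hs] at h1
    rw [List.length_cons, List.range'_succ, List.filter_cons, hz]
    by_cases hx : x = 0
    · simp only [pvZerosB, hx, reduceIte]
      rw [show pvZerosB rest (p.length + 1) = pvZerosB rest (p.length + 1) from rfl, h1]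
      simp [hx]
    · simp only [pvZerosB]
      rw [if_neg hx, h1]
      simp [hx]

theorem pvZerosB_eq (s : List Int) : pvZerosB s 0 = pvZF s := by
  have := pvZerosB_go s []
  simpa [pvZF, List.range_eq_range'] using this

theorem pvZF_sorted (s : List Int) : (pvZF s).Pairwise (· < ·) :=
  (List.pairwise_lt_range).filter _

theorem pvZF_mem (s : List Int) (k : Nat) : k ∈ pvZF s ↔ k < s.length ∧ pvZ s k = true := by
  simp [pvZF, List.mem_filter, List.mem_range]

theorem pvZF_mono (s : List Int) (a b : Nat) (ha : a < (pvZF s).length) (hb : b < (pvZF s).length)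
    (hab : a ≤ b) : (pvZF s)[a] ≤ (pvZF s)[b] := by
  rcases Nat.lt_or_ge a b with h | h
  · exact le_of_lt ((List.pairwise_iff_getElem.mp (pvZF_sorted s)) a b ha hb h)
  · have : a = b := by omega
    subst this
    exact le_refl _

theorem pvAdvance_spec (zeros : List Nat) (i : Nat) (j : Nat) (hj : j ≤ zeros.length)
    (hbelow : ∀ k, (hk : k < zeros.length) → k < j → zeros[k] < i) :
    j ≤ pvAdvance zeros j i ∧ pvAdvance zeros j i ≤ zeros.length ∧
    (∀ k, (hk : k < zeros.length) → k < pvAdvance zeros j i → zeros[k] < i) ∧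
    (∀ h : pvAdvance zeros j i < zeros.length, i ≤ zeros[pvAdvance zeros j i]) := by
  induction hn : zeros.length - j generalizing j with
  | zero =>
    have hnj : ¬ j < zeros.length := by omega
    rw [pvAdvance, dif_neg hnj]
    exact ⟨le_refl _, hj, hbelow, fun h => absurd h hnj⟩
  | succ n ihn =>
    rw [pvAdvance]
    by_cases h : j < zeros.length
    · rw [dif_pos h]
      by_cases hlt : zeros[j] < i
      · rw [if_pos hlt]
        have hb' : ∀ k, (hk : k < zeros.length) → k < j + 1 → zeros[k] < i := by
          intro k hk hkj
          rcases Nat.lt_or_ge k j with h' | h'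
          · exact hbelow k hk h'
          · have hkj' : k = j := by omega
            subst hkj'
            exact hlt
        obtain ⟨a, b, c, e⟩ := ihn (j + 1) (by omega) hb' (by omega)
        exact ⟨by omega, b, c, e⟩
      · rw [if_neg hlt]
        exact ⟨le_refl _, by omega, hbelow, fun _ => by omega⟩
    · rw [dif_neg h]
      exact ⟨le_refl _, hj, hbelow, fun hh => absurd hh h⟩

theorem pvFilter_eq_take (zs : List Nat) (P : Nat → Bool) :
    ∀ (j : Nat), j ≤ zs.length → (∀ k, (hk : k < zs.length) → P zs[k] = decide (k < j)) →
    zs.filter P = zs.take j := by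
  induction zs with
  | nil => intro j _ _; simp
  | cons z t ih =>
    intro j hj hP
    cases j with
    | zero =>
      have h0 : P z = false := by simpa using hP 0 (by simp)
      have hrest : t.filter P = t.take 0 := by
        apply ih 0 (by omega)
        intro k hk
        simpa using hP (k + 1) (by simpa using Nat.succ_lt_succ hk)
      simp only [List.filter_cons, h0]
      simpa using hrest
    | succ j' =>
      have h0 : P z = true := by simpa using hP 0 (by simp)
      have hrest : t.filter P = t.take j' := by
        apply ih j' (by simpa using hj)
        intro k hk
        have := hP (k + 1) (by simpa using Nat.succ_lt_succ hk)
        simpa using this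
      simp only [List.filter_cons, h0, List.take_succ_cons, reduceIte]
      rw [hrest]

theorem pvFilter_eq_drop (zs : List Nat) (P : Nat → Bool) :
    ∀ (j : Nat), j ≤ zs.length → (∀ k, (hk : k < zs.length) → P zs[k] = decide (j ≤ k)) →
    zs.filter P = zs.drop j := by
  induction zs with
  | nil => intro j _ _; simp
  | cons z t ih =>
    intro j hj hP
    cases j with
    | zero =>
      have : ∀ k, (hk : k < (z :: t).length) → P (z :: t)[k] = true := by
        intro k hk
        simpa using hP k hk
      rw [List.filter_eq_self.mpr, List.drop_zero]
      intro a ha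
      obtain ⟨k, hk, rfl⟩ := List.mem_iff_getElem.mp ha
      exact this k hk
    | succ j' =>
      have h0 : P z = false := by simpa using hP 0 (by simp)
      have hrest : t.filter P = t.drop j' := by
        apply ih j' (by simpa using hj)
        intro k hk
        have := hP (k + 1) (by simpa using Nat.succ_lt_succ hk)
        simpa using this
      simp only [List.filter_cons, h0, List.drop_succ_cons]
      exact hrest

theorem pvRangeFilterLt (n i : Nat) (h : i ≤ n) :
    (List.range n).filter (fun k => decide (k < i)) = List.range i := by
  induction n with
  | zero =>
    have : i = 0 := by omega
    subst this
    rfl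
  | succ n ihn =>
    rcases Nat.lt_or_ge n i with hni | hni
    · have : i = n + 1 := by omega
      subst this
      apply List.filter_eq_self.mpr
      intro a ha
      simp only [List.mem_range] at ha
      simpa using ha
    · rw [List.range_succ, List.filter_append, ihn hni]
      have : ¬ n < i := by omega
      simp [this]

theorem pvTake_getLast (zs : List Nat) (j : Nat) (h0 : 0 < j) (hle : j ≤ zs.length) :
    (zs.take j).getLast? = some (zs.getD (j - 1) 0) := by
  have hl : (zs.take j).length = j := by simp [hle]
  have hj1 : j - 1 < zs.length := by omega
  rw [List.getLast?_eq_getElem?, hl, List.getElem?_take, if_pos (by omega : j - 1 < j)]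
  simp [List.getD_eq_getElem?_getD, List.getElem?_eq_getElem hj1]

theorem pvBridge (s : List Int) (m : Nat) (hm : m ≤ s.length) (hzm : pvZ s m = false)
    (j' : Nat) (hle : j' ≤ (pvZF s).length)
    (hall : ∀ k, (hk : k < (pvZF s).length) → k < j' → (pvZF s)[k] < m)
    (hge : ∀ _ : j' < (pvZF s).length, m ≤ (pvZF s)[j']) :
    (List.range m).filter (pvZ s) = (pvZF s).take j' ∧
    (List.range s.length).filter (fun k => decide (m < k) && pvZ s k) = (pvZF s).drop j' := by
  constructor
  · have h1 : (List.range m).filter (pvZ s)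
        = ((List.range s.length).filter (fun k => decide (k < m))).filter (pvZ s) := by
      rw [pvRangeFilterLt s.length m hm]
    rw [h1, List.filter_comm]
    apply pvFilter_eq_take _ _ j' hle
    intro k hk
    simp only [decide_eq_decide]
    by_cases hkj : k < j'
    · have := hall k hk hkj
      constructor <;> intro <;> omega
    · have hj'k : j' ≤ k := by omega
      have hj'lt : j' < (pvZF s).length := by omega
      have h2 : m ≤ (pvZF s)[k] := le_trans (hge hj'lt) (pvZF_mono s j' k hj'lt hk hj'k)
      constructor <;> intro <;> omega
  · have h2 : (List.range s.length).filter (fun k => decide (m < k) && pvZ s k)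
        = (pvZF s).filter (fun k => decide (m < k)) := by
      unfold pvZF
      rw [List.filter_filter]
    rw [h2]
    apply pvFilter_eq_drop _ _ j' hle
    intro k hk
    simp only [decide_eq_decide]
    by_cases hkj : k < j'
    · have := hall k hk hkj
      constructor <;> intro <;> omega
    · have hj'k : j' ≤ k := by omega
      have hj'lt : j' < (pvZF s).length := by omega
      have h1 : m ≤ (pvZF s)[k] := le_trans (hge hj'lt) (pvZF_mono s j' k hj'lt hk hj'k)
      have h3 : (pvZF s)[k] ≠ m := by
        intro he
        have hmem : (pvZF s)[k] ∈ pvZF s := List.getElem_mem hk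
        rw [he, pvZF_mem, hzm] at hmem
        exact absurd hmem.2 (by simp)
      constructor <;> intro <;> omega

theorem pvIfMin (a b : Int) : (if a > b then b else a) = min a b := by
  rw [min_def]
  split_ifs <;> omega

theorem pvLoopB_spec (sd : Int) (s : List Int) (l p : List Int) (j : Nat) (res : List Int)
    (hs : s = p ++ l) (hj : j ≤ (pvZF s).length)
    (hbelow : ∀ k, (hk : k < (pvZF s).length) → k < j → (pvZF s)[k] < p.length) :
    pvLoopB sd (pvZF s) l p.length j res = res ++ pvVals (pvVal sd s) p.length l.length := by
  induction l generalizing p j res with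
  | nil => simp [pvLoopB, pvVals]
  | cons x rest ih =>
    have hsx : s = (p ++ [x]) ++ rest := by rw [hs]; simp
    have hm : p.length < s.length := by rw [hs]; simp
    have hzmx : pvZ s p.length = (x == 0) := by rw [hs]; exact pvZ_concat p x rest
    by_cases hx : x = 0
    · have hv : pvVal sd s p.length = 0 := by
        unfold pvVal
        rw [hzmx]
        simp [hx]
      have hb : ∀ k, (hk : k < (pvZF s).length) → k < j → (pvZF s)[k] < (p ++ [x]).length := by
        intro k hk hkj
        have := hbelow k hk hkj
        simp
        omega
      have h1 := ih (p ++ [x]) j (res ++ [0]) hsx hj hb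
      rw [(by simp : (p ++ [x]).length = p.length + 1)] at h1
      simp only [pvLoopB]
      rw [if_pos hx, List.length_cons]
      simp only [pvVals]
      rw [hv]
      rw [← List.append_cons] at h1
      exact h1
    · have hzf : pvZ s p.length = false := by
        rw [hzmx]
        simp [hx]
      obtain ⟨hjle, hj'le, hall, hge⟩ := pvAdvance_spec (pvZF s) p.length j hj hbelow
      obtain ⟨hbl, hbr⟩ := pvBridge s p.length (le_of_lt hm) hzf (pvAdvance (pvZF s) j p.length)
        hj'le hall hge
      have hlz : pvLz s p.length =
          (if 0 < pvAdvance (pvZF s) j p.length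
            then some ((pvZF s).getD (pvAdvance (pvZF s) j p.length - 1) 0) else none) := by
        unfold pvLz
        rw [hbl]
        by_cases h0 : 0 < pvAdvance (pvZF s) j p.length
        · rw [if_pos h0, pvTake_getLast _ _ h0 hj'le]
        · have h00 : pvAdvance (pvZF s) j p.length = 0 := by omega
          rw [if_neg h0, h00]
          simp
      have hnz : pvNz s p.length = (pvZF s)[pvAdvance (pvZF s) j p.length]? := by
        unfold pvNz
        rw [hbr, List.head?_drop]
      have hb' : ∀ k, (hk : k < (pvZF s).length) → k < pvAdvance (pvZF s) j p.length →
          (pvZF s)[k] < (p ++ [x]).length := by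
        intro k hk hkj
        have := hall k hk hkj
        simp
        omega
      simp only [pvLoopB]
      rw [if_neg hx, List.length_cons]
      simp only [pvVals]
      cases hrz : (pvZF s)[pvAdvance (pvZF s) j p.length]? with
      | some rz =>
        have hv : min (if 0 < pvAdvance (pvZF s) j p.length
              then (p.length : Int) - ((pvZF s).getD (pvAdvance (pvZF s) j p.length - 1) 0 : Nat)
              else sd) ((rz : Int) - (p.length : Int)) = pvVal sd s p.length := by
          unfold pvVal
          rw [hzf, hnz, hrz, hlz]
          by_cases h0 : 0 < pvAdvance (pvZF s) j p.length <;> simp [h0]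
        have h1 := ih (p ++ [x]) (pvAdvance (pvZF s) j p.length)
          (res ++ [pvVal sd s p.length]) hsx hj'le hb'
        rw [(by simp : (p ++ [x]).length = p.length + 1), ← List.append_cons] at h1
        simpa only [hv] using h1
      | none =>
        have hv : (if 0 < pvAdvance (pvZF s) j p.length
              then (p.length : Int) - ((pvZF s).getD (pvAdvance (pvZF s) j p.length - 1) 0 : Nat)
              else sd) = pvVal sd s p.length := by
          unfold pvVal
          rw [hzf, hnz, hrz, hlz]
          by_cases h0 : 0 < pvAdvance (pvZF s) j p.length <;> simp [h0]
        have h1 := ih (p ++ [x]) (pvAdvance (pvZF s) j p.length)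
          (res ++ [pvVal sd s p.length]) hsx hj'le hb'
        rw [(by simp : (p ++ [x]).length = p.length + 1), ← List.append_cons] at h1
        simpa only [hv] using h1

theorem house_calc_alt_eq (sd : Int) (s : List Int) :
    house_calc_alt sd s = pvVals (pvVal sd s) 0 s.length := by
  unfold house_calc_alt
  rw [pvZerosB_eq]
  have h := pvLoopB_spec sd s s [] 0 []
    (by simp) (by omega) (by intro k hk hk0; omega)
  simpa using h

theorem house_calc_eq (sd : Int) (s : List Int) :
    house_calc sd s = pvVals (pvVal sd s) 0 s.length := by
  unfold house_calc
  have hf : pvFwdA sd s 0 [] none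
      = (pvVals (pvFwdVal sd s) 0 s.length, pvLz s s.length) := by
    have h := pvFwdA_spec sd s [] []
    simpa using h
  rw [hf]
  apply List.ext_getElem
  · rw [pvBwdA_length, pvVals_length, pvVals_length]
  · intro i h1 h2
    have hn : i < s.length := by rwa [pvVals_length] at h2
    have hd : s.length ≤ (pvVals (pvFwdVal sd s) 0 s.length).length := by
      rw [pvVals_length]
    have hres := pvBwdA_getD s (pvVals (pvFwdVal sd s) 0 s.length) none hd i
    rw [← List.getD_eq_getElem _ 0 h1, ← List.getD_eq_getElem _ 0 h2]
    rw [hres]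
    have hfd : (pvVals (pvFwdVal sd s) 0 s.length).getD i 0 = pvFwdVal sd s i := by
      rw [pvVals_getD _ _ _ _ hn]
      rw [Nat.zero_add]
    have hvd : (pvVals (pvVal sd s) 0 s.length).getD i 0 = pvVal sd s i := by
      rw [pvVals_getD _ _ _ _ hn]
      rw [Nat.zero_add]
    rw [hvd]
    by_cases hz : pvZ s i = true
    · rw [if_neg (by simp [hz])]
      rw [hfd]
      simp [pvVal, pvFwdVal, hz]
    · rw [if_pos ⟨hn, hz⟩]
      simp only [Option.or_none]
      cases hnzi : pvNz s i with
      | none =>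
        rw [hfd]
        simp [pvVal, pvFwdVal, hz, hnzi]
      | some z =>
        rw [hfd]
        have hfv : pvFwdVal sd s i
            = (match pvLz s i with | some m => (i : Int) - m | none => sd) := by
          simp [pvFwdVal, hz]
        unfold pvVal
        rw [hnzi]
        simp only [hz, Bool.false_eq_true, reduceIte]
        rw [hfv, pvIfMin]

-- ===== VERDICT (by name: the statement is the Claim_ definition above) =====
theorem house_calc_spec : Claim_equal_house_calc := by
  unfold Claim_equal_house_calc
  intro sd s _
  unfold Spec_house_calc
  rw [house_calc_eq, house_calc_alt_eq]
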